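-- pv_equiv track=rewrite | github.com/bitbanger/schemas | tests/extract-composites.py | strip_ep_rels
-- ===== SOURCE A (Python) =====
-- def strip_ep_rels(schema):
-- 	lines = []
-- 	taking = True
-- 	for line in schema.split('\n'):
-- 		if 'EPISODE-' in line:
-- 			taking = False
-- 			continue
-- 		if (not taking) and line.strip() == ')':
-- 			taking = True
-- 			continue
-- 		if taking:
-- 			lines.append(line)
--
-- 	return '\n'.join(lines)
-- ===== SOURCE B (Python) =====
-- def strip_ep_rels(schema):
-- 	lines = schema.split('\n')
-- 	out = []
-- 	i = 0
-- 	n = len(lines)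
-- 	while i < n:
-- 		line = lines[i]
-- 		if 'EPISODE-' in line:
-- 			# skip the whole episode-relations block, then the closing ')'
-- 			i += 1
-- 			while i < n and lines[i].strip() != ')':
-- 				i += 1
-- 			i += 1
-- 		else:
-- 			out.append(line)
-- 			i += 1
-- 	return '\n'.join(out)
-- ===== Notes on version B (the rewrite author's own statement) =====
-- stated objective: alternative
-- what changed: Replaces the carried boolean state machine (one flag updated per line) by an index-based scan with an explicit inner loop that consumes a whole EPISODE- block, up to and including its closing parenthesis line, in one go.
import Mathlib
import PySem

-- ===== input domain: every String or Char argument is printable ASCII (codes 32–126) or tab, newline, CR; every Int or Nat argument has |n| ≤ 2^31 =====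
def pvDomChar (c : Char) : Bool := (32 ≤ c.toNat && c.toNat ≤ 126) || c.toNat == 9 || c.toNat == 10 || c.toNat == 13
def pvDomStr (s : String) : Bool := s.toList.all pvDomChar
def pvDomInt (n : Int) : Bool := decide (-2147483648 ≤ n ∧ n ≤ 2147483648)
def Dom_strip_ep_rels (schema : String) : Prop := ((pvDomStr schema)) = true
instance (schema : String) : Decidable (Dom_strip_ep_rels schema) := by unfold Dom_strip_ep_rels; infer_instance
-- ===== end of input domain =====

-- B drops A's carried 'taking' flag: an explicit inner loop consumes each EPISODE- block.

-- ===== PORT A =====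
-- the literal 'EPISODE-' as a char list, shared by both ports
def pvEpisode : List Char := "EPISODE-".toList

-- one fold step per line, state = (kept lines, taking flag), branches in A's order
def pvStepA (st : List (List Char) × Bool) (line : List Char) : List (List Char) × Bool :=
  if PySem.Chars.isIn pvEpisode line then (st.1, false)
  else if !st.2 && (PySem.Chars.strip line == [')']) then (st.1, true)
  else if st.2 then (st.1 ++ [line], st.2) else st

def strip_ep_rels (schema : String) : String :=
  String.ofList (PySem.Chars.join ['\n']
    (((PySem.Chars.splitOn schema.toList ['\n']).foldl pvStepA ([], true)).1))

-- ===== PORT B =====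
-- inner while loop of Source B: advance past lines whose strip() != ')' and then one more
def pvSkipBlock : List (List Char) → List (List Char)
  | [] => []
  | l :: rest => if PySem.Chars.strip l == [')'] then rest else pvSkipBlock rest

theorem pvSkipBlock_length_le : ∀ ls : List (List Char), (pvSkipBlock ls).length ≤ ls.length := by
  intro ls
  induction ls with
  | nil => simp [pvSkipBlock]
  | cons l rest ih =>
    simp only [pvSkipBlock]
    split
    · simp
    · exact Nat.le_succ_of_le ih

-- outer while loop of Source B
def pvKeep : List (List Char) → List (List Char)
  | [] => []
  | l :: rest =>
    if PySem.Chars.isIn pvEpisode l then pvKeep (pvSkipBlock rest)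
    else l :: pvKeep rest
termination_by ls => ls.length
decreasing_by
  · exact Nat.lt_succ_of_le (pvSkipBlock_length_le rest)
  · simp

def strip_ep_rels_alt (schema : String) : String :=
  String.ofList (PySem.Chars.join ['\n'] (pvKeep (PySem.Chars.splitOn schema.toList ['\n'])))

-- ===== PRECONDITION & SPEC =====
def Spec_strip_ep_rels (schema : String) (out : String) : Prop := out = strip_ep_rels_alt schema
instance (schema : String) (out : String) : Decidable (Spec_strip_ep_rels schema out) := by unfold Spec_strip_ep_rels; infer_instance

-- ===== CLAIM (what is proved, stated in full; the proofs are below) =====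
def Claim_equal_strip_ep_rels : Prop := ∀ (schema : String), Dom_strip_ep_rels schema → Spec_strip_ep_rels schema (strip_ep_rels schema)

-- ===== LEMMAS AND PROOFS =====

-- a non-whitespace character survives dropWhile isspace
theorem mem_dropWhile_isspace {c : Char} {cs : List Char}
    (hc : c ∈ cs) (hs : PySem.Chars.isspace c = false) :
    c ∈ cs.dropWhile PySem.Chars.isspace := by
  rcases List.mem_append.mp (by rw [List.takeWhile_append_dropWhile] at *; exact hc :
      c ∈ cs.takeWhile PySem.Chars.isspace ++ cs.dropWhile PySem.Chars.isspace) with h | h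
  · exact absurd (List.mem_takeWhile_imp h) (by simp [hs])
  · exact h

theorem mem_strip {c : Char} {cs : List Char}
    (hc : c ∈ cs) (hs : PySem.Chars.isspace c = false) :
    c ∈ PySem.Chars.strip cs := by
  unfold PySem.Chars.strip PySem.Chars.lstrip PySem.Chars.rstrip
  exact List.mem_reverse.mpr
    (mem_dropWhile_isspace (List.mem_reverse.mpr (mem_dropWhile_isspace hc hs)) hs)

-- a line containing "EPISODE-" cannot strip to ")"
theorem episode_not_paren {l : List Char}
    (h : PySem.Chars.isIn pvEpisode l = true) :
    ¬ (PySem.Chars.strip l == [')']) = true := by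
  intro hb
  have hEq : PySem.Chars.strip l = [')'] := beq_iff_eq.mp hb
  have hinf : pvEpisode <:+: l := (PySem.Chars.isIn_iff_infix _ _).mp h
  have hE : 'E' ∈ l := hinf.mem (by decide)
  have : 'E' ∈ PySem.Chars.strip l := mem_strip hE (by decide)
  rw [hEq] at this
  simp at this

-- combined loop invariant: A's fold with taking = true computes pvKeep,
-- with taking = false it computes pvKeep after pvSkipBlock
theorem fold_eq_keep : ∀ (ls : List (List Char)),
    (∀ acc, (ls.foldl pvStepA (acc, true)).1 = acc ++ pvKeep ls) ∧
    (∀ acc, (ls.foldl pvStepA (acc, false)).1 = acc ++ pvKeep (pvSkipBlock ls)) := by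
  intro ls
  induction ls with
  | nil => simp [pvKeep, pvSkipBlock]
  | cons l rest ih =>
    obtain ⟨ihT, ihF⟩ := ih
    constructor
    · intro acc
      by_cases hep : PySem.Chars.isIn pvEpisode l = true
      · rw [List.foldl_cons, pvKeep, pvStepA, if_pos hep, if_pos hep]
        exact ihF acc
      · rw [List.foldl_cons, pvKeep, pvStepA, if_neg hep, if_neg hep]
        simp only [Bool.not_true, Bool.false_and, Bool.false_eq_true, if_false, if_true]
        rw [ihT (acc ++ [l])]
        simp
    · intro acc
      by_cases hep : PySem.Chars.isIn pvEpisode l = true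
      · rw [List.foldl_cons, pvSkipBlock, pvStepA, if_pos hep,
            if_neg (episode_not_paren hep)]
        exact ihF acc
      · by_cases hp : (PySem.Chars.strip l == [')']) = true
        · rw [List.foldl_cons, pvSkipBlock, pvStepA, if_neg hep, if_pos hp]
          simp only [Bool.not_false, Bool.true_and, hp, if_true]
          exact ihT acc
        · rw [List.foldl_cons, pvSkipBlock, pvStepA, if_neg hep, if_neg hp]
          simp only [Bool.not_false, Bool.true_and, hp, Bool.false_eq_true, if_false]
          exact ihF acc

-- ===== VERDICT (by name: the statement is the Claim_ definition above) =====
theorem strip_ep_rels_spec : Claim_equal_strip_ep_rels := by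
  intro schema _
  unfold Spec_strip_ep_rels strip_ep_rels strip_ep_rels_alt
  rw [(fold_eq_keep (PySem.Chars.splitOn schema.toList ['\n'])).1 []]
  simp
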